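-- pv_equiv track=rewrite | github.com/123R3N321/PTC | cs1114and1134/leetcode2434.py | q2434
-- ===== SOURCE A (Python) =====
-- def q2434(msg):
--     if len(msg) <= 1: return msg
--     start = 0  # start with ind pos 0 of msg
--     end = minScan(msg, 0)  # remember the upperbound exclusive, we need to go up by one later
--     stack = []  # stack for intermediate
--     res = []
--     while start < len(msg):  # scan entire msg
--         for i in range(start, end + 1):  # upperbound exclusive, need +1
--             stack.append(msg[i])  # push all chars between prev min char (exc) and cur min char (inc)
--
--         res.append(stack.pop())  # garanteed min char
--         start = end + 1  # the min char position +1 is where next scan starts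
--         if start < len(msg):
--             end = minScan(msg, start)  # find ind pos of next min char, set that as upperbound
--
--             while len(stack) > 0 and stack[-1] <= msg[
--                 end]:  # check if the top of the stack is smaller than next min char in msg
--                 res.append(stack.pop())  # if so, that is better answer before we put next min char into stack
--         else:  # we are at last elem of msg
--             while len(stack) > 0 and stack[-1] <= msg[-1]:
--                 res.append(stack.pop())
--
--     while len(stack) > 0:
--         res.append(stack.pop())
--     return ''.join(res)
--
-- def minScan(msg, start):
--     minInd = start
--     for i in range(start, len(msg)):
--         if msg[i] < msg[minInd]:  # only update when strictly smaller
--             minInd = i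
--     return minInd
-- ===== SOURCE B (Python) =====
-- def q2434(msg):
--     # O(n): suffix-minimum array + one stack pass, instead of repeated O(n) min scans.
--     suf = [None]  # suf reversed-built: suf[k] = min of msg[n-k:], None for empty suffix
--     cur = None
--     for ch in reversed(msg):
--         cur = ch if cur is None or ch < cur else cur
--         suf.append(cur)
--     suf.reverse()  # now suf[i] = min of msg[i:], suf[n] = None
--     stack = []
--     res = []
--     for i, ch in enumerate(msg):
--         stack.append(ch)
--         nxt = suf[i + 1]
--         while stack and (nxt is None or stack[-1] <= nxt):
--             res.append(stack.pop())
--     res.extend(reversed(stack))  # stack is already empty here, kept for clarity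
--     return ''.join(res)
-- ===== Notes on version B (the rewrite author's own statement) =====
-- stated objective: faster
-- what changed: Replaced A's repeated minScan passes (a fresh O(n) minimum scan per emitted segment) by a suffix-minimum array computed once in one backward pass, then a single forward stack pass that pops while the top is <= the minimum of the remaining suffix.
import Mathlib
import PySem

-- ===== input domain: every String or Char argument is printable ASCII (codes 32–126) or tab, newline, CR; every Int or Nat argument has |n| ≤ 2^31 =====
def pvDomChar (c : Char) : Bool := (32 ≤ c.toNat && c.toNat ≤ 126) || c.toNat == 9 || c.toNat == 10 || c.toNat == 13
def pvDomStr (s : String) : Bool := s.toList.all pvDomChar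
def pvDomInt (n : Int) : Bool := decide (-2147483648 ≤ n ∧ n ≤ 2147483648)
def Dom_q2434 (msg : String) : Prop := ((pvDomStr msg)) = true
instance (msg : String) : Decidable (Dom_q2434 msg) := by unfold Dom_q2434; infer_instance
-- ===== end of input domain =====

-- B replaces A's repeated O(n) minimum re-scans by a suffix-minimum array built once
-- plus a single stack pass (objective: faster, asymptotic O(n^2) → O(n)).

-- ===== PORT A =====

-- pop loop shared by both ports (both Pythons contain the literal loop
-- 'while stack and <cond on stack[-1]>: res.append(stack.pop())');
-- stacks are Lean lists with the TOP at the HEAD; returns (popped-in-order, remaining)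
def popWhile (p : Char → Bool) : List Char → List Char × List Char
  | [] => ([], [])
  | c :: rest =>
    if p c then
      let r := popWhile p rest
      (c :: r.1, r.2)
    else ([], c :: rest)

-- 'for i in range(start, len(msg)): if msg[i] < msg[minInd]: minInd = i'
-- (indices produced by range are always in bounds, so getD is exact here)
def minScan (cs : List Char) (start : Nat) : Nat :=
  (List.range' start (cs.length - start)).foldl
    (fun minInd i => if cs.getD i ' ' < cs.getD minInd ' ' then i else minInd) start

-- A's outer while loop; fuel = n - start bound (start strictly increases each turn,
-- so fuel = cs.length at the top level is always enough); result = chars appended to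
-- res from this point on, with the final 'while stack: res.append(stack.pop())'
-- showing up as the 'else stack' branch / fuel-exhausted branch.
def aloop (cs : List Char) (fuel start end_ : Nat) (stack : List Char) : List Char :=
  match fuel with
  | 0 => stack
  | fuel + 1 =>
    if start < cs.length then
      -- for i in range(start, end + 1): stack.append(msg[i])
      let stack1 := (List.range' start (end_ + 1 - start)).foldl
        (fun st i => cs.getD i ' ' :: st) stack
      match stack1 with
      | [] => []  -- unreachable: the push loop ran at least once
      | top :: rest =>
        -- res.append(stack.pop()); start = end + 1
        let start' := end_ + 1
        if start' < cs.length then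
          let end' := minScan cs start'
          let pr := popWhile (fun c => c ≤ cs.getD end' ' ') rest
          top :: (pr.1 ++ aloop cs fuel start' end' pr.2)
        else
          -- while stack and stack[-1] <= msg[-1]
          let pr := popWhile (fun c => c ≤ cs.getD (cs.length - 1) ' ') rest
          top :: (pr.1 ++ aloop cs fuel start' end_ pr.2)
    else stack

def q2434 (msg : String) : String :=
  let cs := msg.toList
  if cs.length ≤ 1 then msg
  else String.ofList (aloop cs cs.length 0 (minScan cs 0) [])

-- ===== PORT B =====

-- Source B's backward pass 'for ch in reversed(msg): cur = ch if cur is None or ch < cur else cur;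
-- suf.append(cur)' (+ reverse) as the obvious structural recursion; suffs cs ! i = min of cs[i:]
def suffs : List Char → List (Option Char)
  | [] => [none]
  | c :: rest =>
    let s := suffs rest
    (match s.headD none with
     | none => some c
     | some m => if c < m then some c else some m) :: s

-- 'for i, ch in enumerate(msg): stack.append(ch); pop while …' ;
-- the final 'res.extend(reversed(stack))' is the '[] => stack' branch
def bloop (suf : List (Option Char)) (i : Nat) : List Char → List Char → List Char
  | [], stack => stack
  | c :: rest, stack =>
    let p : Char → Bool := fun t =>
      match suf.getD (i + 1) none with
      | none => true            -- empty remaining suffix: pop everything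
      | some m => t ≤ m
    let pr := popWhile p (c :: stack)
    pr.1 ++ bloop suf (i + 1) rest pr.2

def q2434_alt (msg : String) : String :=
  let cs := msg.toList
  String.ofList (bloop (suffs cs) 0 cs [])

-- ===== PRECONDITION & SPEC =====
def Spec_q2434 (msg : String) (out : String) : Prop := out = q2434_alt msg
instance (msg : String) (out : String) : Decidable (Spec_q2434 msg out) := by unfold Spec_q2434; infer_instance

-- ===== CLAIM (what is proved, stated in full; the proofs are below) =====
def Claim_equal_q2434 : Prop := ∀ (msg : String), Dom_q2434 msg → Spec_q2434 msg (q2434 msg)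

-- ===== LEMMAS AND PROOFS =====

-- minimum value of a char list (proof-only mirror of what suffs stores)
def minv : List Char → Option Char
  | [] => none
  | c :: rest =>
    match minv rest with
    | none => some c
    | some m => if c < m then some c else some m

-- minScan's foldl, as a named function for the invariant proof
def mfold (cs : List Char) (s k m : Nat) : Nat :=
  (List.range' s k).foldl (fun mi i => if cs.getD i ' ' < cs.getD mi ' ' then i else mi) m

lemma popWhile_append (p : Char → Bool) (l : List Char) :
    (popWhile p l).1 ++ (popWhile p l).2 = l := by
  induction l with
  | nil => simp [popWhile]
  | cons c rest ih =>
    by_cases h : p c <;> simp [popWhile, h, ih]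

lemma popWhile_true (l : List Char) :
    popWhile (fun _ => true) l = (l, []) := by
  induction l with
  | nil => rfl
  | cons c rest ih => simp [popWhile, ih]

lemma popWhile_cons_pos (p : Char → Bool) (c : Char) (l : List Char) (h : p c = true) :
    popWhile p (c :: l) = (c :: (popWhile p l).1, (popWhile p l).2) := by
  simp [popWhile, h]

lemma popWhile_cons_neg (p : Char → Bool) (c : Char) (l : List Char) (h : p c = false) :
    popWhile p (c :: l) = ([], c :: l) := by
  simp [popWhile, h]

lemma minv_isSome {l : List Char} (h : l ≠ []) : (minv l).isSome := by
  cases l with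
  | nil => simp at h
  | cons c rest =>
    rw [minv]
    cases minv rest with
    | none => simp
    | some k => by_cases hc : c < k <;> simp [hc]

lemma minv_mem : ∀ {l : List Char} {m : Char}, minv l = some m → m ∈ l ∧ ∀ x ∈ l, m ≤ x := by
  intro l
  induction l with
  | nil => intro m h; simp [minv] at h
  | cons c rest ih =>
    intro m h
    rw [minv] at h
    cases hr : minv rest with
    | none =>
      rw [hr] at h
      have hrest : rest = [] := by
        cases rest with
        | nil => rfl
        | cons d t =>
          exfalso
          have hs := minv_isSome (l := d :: t) (by simp)
          rw [hr] at hs; simp at hs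
      subst hrest
      injection h with h2; subst h2
      simp
    | some k =>
      rw [hr] at h
      have h' : (if c < k then some c else some k) = some m := h
      obtain ⟨hk1, hk2⟩ := ih hr
      by_cases hc : c < k
      · rw [if_pos hc] at h'
        injection h' with h2; subst h2
        refine ⟨by simp, ?_⟩
        intro x hx
        rcases List.mem_cons.mp hx with rfl | hx
        · exact le_refl _
        · exact le_of_lt (lt_of_lt_of_le hc (hk2 x hx))
      · rw [if_neg hc] at h'
        injection h' with h2; subst h2
        refine ⟨List.mem_cons_of_mem _ hk1, ?_⟩
        intro x hx
        rcases List.mem_cons.mp hx with rfl | hx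
        · exact le_of_not_gt hc
        · exact hk2 x hx

lemma suffs_head (cs : List Char) : (suffs cs).headD none = minv cs := by
  induction cs with
  | nil => rfl
  | cons c rest ih =>
    rw [suffs]
    simp only [List.headD_cons]
    rw [ih, minv]

lemma suffs_getD (cs : List Char) : ∀ i, (suffs cs).getD i none = minv (cs.drop i) := by
  induction cs with
  | nil =>
    intro i
    cases i <;> simp [suffs, minv, List.getD]
  | cons c rest ih =>
    intro i
    cases i with
    | zero =>
      rw [List.drop_zero, suffs]
      simp only [List.getD_cons_zero]
      rw [suffs_head, minv]
    | succ j =>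
      rw [suffs]
      simp only [List.getD_cons_succ]
      rw [ih j]
      rfl

-- pushing cs[s..s+k) onto a head-top stack = reversed slice prepended
lemma foldl_push (cs : List Char) :
    ∀ (k s : Nat) (stack : List Char), s + k ≤ cs.length →
      (List.range' s k).foldl (fun st i => cs.getD i ' ' :: st) stack
        = ((cs.drop s).take k).reverse ++ stack := by
  intro k
  induction k with
  | zero => intro s stack _; simp
  | succ k ih =>
    intro s stack hk
    have hs : s < cs.length := by omega
    rw [List.range'_succ, List.foldl_cons]
    rw [ih (s + 1) _ (by omega)]
    have hdrop : cs.drop s = cs[s] :: cs.drop (s + 1) :=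
      (List.getElem_cons_drop hs).symm
    have hgd : cs.getD s ' ' = cs[s] := List.getD_eq_getElem cs ' ' hs
    rw [hdrop, List.take_succ_cons, List.reverse_cons, hgd]
    simp

-- argmin-fold invariant for minScan's loop
lemma minScan_go (cs : List Char) :
    ∀ (k s m : Nat), m ≤ s →
      (mfold cs s k m = m ∨ (s ≤ mfold cs s k m ∧ mfold cs s k m < s + k)) ∧
      cs.getD (mfold cs s k m) ' ' ≤ cs.getD m ' ' ∧
      (∀ j, s ≤ j → j < s + k → cs.getD (mfold cs s k m) ' ' ≤ cs.getD j ' ') ∧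
      (∀ j, s ≤ j → j < s + k → j < mfold cs s k m →
        cs.getD (mfold cs s k m) ' ' < cs.getD j ' ') ∧
      (mfold cs s k m ≠ m → cs.getD (mfold cs s k m) ' ' < cs.getD m ' ') := by
  intro k
  induction k with
  | zero =>
    intro s m hm
    have h0 : mfold cs s 0 m = m := rfl
    rw [h0]
    exact ⟨Or.inl rfl, le_refl _, fun j h1 h2 => by omega, fun j h1 h2 _ => by omega,
      fun h => absurd rfl h⟩
  | succ k ih =>
    intro s m hm
    have hstep : mfold cs s (k + 1) m
        = mfold cs (s + 1) k (if cs.getD s ' ' < cs.getD m ' ' then s else m) := by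
      rw [mfold, List.range'_succ, List.foldl_cons]; rfl
    set m' := if cs.getD s ' ' < cs.getD m ' ' then s else m with hm'
    have hm's : m' ≤ s + 1 := by rw [hm']; split <;> omega
    obtain ⟨h1, h2, h3, h4, h5⟩ := ih (s + 1) m' hm's
    set r := mfold cs (s + 1) k m' with hr
    rw [hstep]
    have hval : cs.getD m' ' ' ≤ cs.getD m ' ' ∧ cs.getD m' ' ' ≤ cs.getD s ' ' := by
      rw [hm']; split
      · exact ⟨le_of_lt (by assumption), le_refl _⟩
      · exact ⟨le_refl _, le_of_not_gt (by assumption)⟩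
    refine ⟨?_, le_trans h2 hval.1, ?_, ?_, ?_⟩
    · rcases h1 with heq | hb
      · rw [hm'] at heq
        by_cases hc : cs.getD s ' ' < cs.getD m ' '
        · right; rw [if_pos hc] at heq; omega
        · left; rwa [if_neg hc] at heq
      · right; omega
    · intro j hj1 hj2
      by_cases hj : j = s
      · rw [hj]; exact le_trans h2 hval.2
      · exact h3 j (by omega) (by omega)
    · intro j hj1 hj2 hjr
      by_cases hj : j = s
      · by_cases hrm : r = m'
        · exfalso
          rw [hm'] at hrm
          by_cases hc : cs.getD s ' ' < cs.getD m ' '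
          · rw [if_pos hc] at hrm; omega
          · rw [if_neg hc] at hrm; omega
        · rw [hj]; exact lt_of_lt_of_le (h5 hrm) hval.2
      · exact h4 j (by omega) (by omega) hjr
    · intro hrm
      by_cases hrm' : r = m'
      · rw [hrm'] at hrm ⊢
        rw [hm'] at hrm ⊢
        by_cases hc : cs.getD s ' ' < cs.getD m ' '
        · rwa [if_pos hc]
        · rw [if_neg hc] at hrm; exact absurd rfl hrm
      · exact lt_of_lt_of_le (h5 hrm') hval.1

lemma minScan_spec (cs : List Char) (start : Nat) (h : start < cs.length) :
    start ≤ minScan cs start ∧ minScan cs start < cs.length ∧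
    (∀ j, start ≤ j → j < cs.length → cs.getD (minScan cs start) ' ' ≤ cs.getD j ' ') ∧
    (∀ j, start ≤ j → j < minScan cs start → cs.getD (minScan cs start) ' ' < cs.getD j ' ') := by
  have hms : minScan cs start = mfold cs start (cs.length - start) start := rfl
  obtain ⟨h1, _, h3, h4, _⟩ := minScan_go cs (cs.length - start) start start (le_refl _)
  have hk : start + (cs.length - start) = cs.length := by omega
  rw [hk] at h1 h3 h4
  rw [hms]
  exact ⟨by rcases h1 with heq | hb <;> omega, by rcases h1 with heq | hb <;> omega,
    h3, fun j hj1 hj2 => h4 j hj1 (by rcases h1 with heq | hb <;> omega) hj2⟩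

-- minv of a suffix whose minimum value is attained at index e
lemma minv_drop (cs : List Char) (k e : Nat) (hk : k ≤ e) (he : e < cs.length)
    (hmin : ∀ j, k ≤ j → j < cs.length → cs.getD e ' ' ≤ cs.getD j ' ') :
    minv (cs.drop k) = some (cs.getD e ' ') := by
  have hne : cs.drop k ≠ [] := by
    simp [List.drop_eq_nil_iff]; omega
  obtain ⟨m, hm⟩ := Option.isSome_iff_exists.mp (minv_isSome hne)
  obtain ⟨hmem, hle⟩ := minv_mem hm
  rw [hm]
  congr 1
  obtain ⟨j, hj, hjm⟩ := List.mem_iff_getElem.mp hmem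
  have hjlen : k + j < cs.length := by
    have := hj; simp [List.length_drop] at this; omega
  have hmval : m = cs.getD (k + j) ' ' := by
    rw [List.getD_eq_getElem cs ' ' hjlen, ← List.getElem_drop, hjm]
    exact hj
  have h1 : cs.getD e ' ' ≤ m := by rw [hmval]; exact hmin _ (by omega) hjlen
  have h2 : m ≤ cs.getD e ' ' := by
    apply hle
    have hlt : e - k < (cs.drop k).length := by simp [List.length_drop]; omega
    have : cs.getD e ' ' = (cs.drop k)[e - k]'hlt := by
      rw [List.getD_eq_getElem cs ' ' he, List.getElem_drop]
      congr 1; omega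
    rw [this]
    exact List.getElem_mem _
  exact le_antisymm h2 h1

-- marching through [i, e): B pushes without popping (every char there is > the segment min)
lemma bloop_seg (cs : List Char) (start e : Nat) (he : e < cs.length)
    (hmin : ∀ j, start ≤ j → j < cs.length → cs.getD e ' ' ≤ cs.getD j ' ')
    (hstrict : ∀ j, start ≤ j → j < e → cs.getD e ' ' < cs.getD j ' ') :
    ∀ (d i : Nat) (stack : List Char), d = e - i → start ≤ i → i ≤ e →
      bloop (suffs cs) i (cs.drop i) stack
        = bloop (suffs cs) e (cs.drop e) (((cs.drop i).take (e - i)).reverse ++ stack) := by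
  intro d
  induction d with
  | zero =>
    intro i stack hd h1 h2
    have : i = e := by omega
    subst this
    simp
  | succ d ih =>
    intro i stack hd h1 h2
    have hie : i < e := by omega
    have hin : i < cs.length := by omega
    have hdrop : cs.drop i = cs[i] :: cs.drop (i + 1) := (List.getElem_cons_drop hin).symm
    rw [hdrop, bloop]
    have hsuf : (suffs cs).getD (i + 1) none = some (cs.getD e ' ') := by
      rw [suffs_getD]
      exact minv_drop cs (i + 1) e (by omega) he
        (fun j hj1 hj2 => hmin j (by omega) hj2)
    have hp : (fun t => match (suffs cs).getD (i + 1) none with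
        | none => true
        | some m => decide (t ≤ m)) = (fun t => decide (t ≤ cs.getD e ' ')) := by
      funext t; rw [hsuf]
    have hlt : cs.getD e ' ' < cs[i] := by
      have := hstrict i h1 hie
      rwa [List.getD_eq_getElem cs ' ' hin] at this
    have hpc : decide (cs[i] ≤ cs.getD e ' ') = false := by
      rw [decide_eq_false_iff_not]
      exact not_le.mpr hlt
    simp only [hp]
    rw [popWhile_cons_neg _ _ _ hpc]
    simp only [List.nil_append]
    rw [ih (i + 1) (cs[i] :: stack) (by omega) (by omega) (by omega)]
    congr 1
    have h2' : e - i = (e - (i + 1)) + 1 := by omega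
    rw [h2', List.take_succ_cons, List.reverse_cons]
    simp

-- the main segment-by-segment equivalence
lemma main_lemma (cs : List Char) :
    ∀ (fuel start : Nat) (stack : List Char), start < cs.length → cs.length ≤ fuel + start →
      bloop (suffs cs) start (cs.drop start) stack
        = aloop cs fuel start (minScan cs start) stack := by
  intro fuel
  induction fuel with
  | zero => intro start stack h1 h2; omega
  | succ fuel ih =>
    intro start stack hs hf
    set e := minScan cs start with he
    obtain ⟨he1, he2, he3, he4⟩ := minScan_spec cs start hs
    rw [bloop_seg cs start e he2 he3 he4 (e - start) start stack rfl (le_refl _) he1]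
    set mid := ((cs.drop start).take (e - start)).reverse with hmid
    have hdropE : cs.drop e = cs[e] :: cs.drop (e + 1) := (List.getElem_cons_drop he2).symm
    rw [hdropE, bloop]
    rw [aloop]
    simp only [if_pos hs]
    have hpush : (List.range' start (e + 1 - start)).foldl
        (fun st i => cs.getD i ' ' :: st) stack = cs[e] :: (mid ++ stack) := by
      rw [foldl_push cs (e + 1 - start) start stack (by omega)]
      have heq : (cs.drop start).take (e + 1 - start)
          = (cs.drop start).take (e - start) ++ [cs[e]] := by
        have h1 : e + 1 - start = (e - start) + 1 := by omega
        have hlt : e - start < (cs.drop start).length := by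
          simp [List.length_drop]; omega
        rw [h1, List.take_add_one, List.getElem?_eq_getElem hlt]
        simp only [Option.toList_some]
        congr 2
        rw [List.getElem_drop]
        congr 1; omega
      rw [heq, List.reverse_append]
      simp [hmid]
    rw [hpush]
    by_cases hlast : e + 1 < cs.length
    · -- middle segment: next minimum exists
      simp only [if_pos hlast]
      obtain ⟨hf1, hf2, hf3, _⟩ := minScan_spec cs (e + 1) hlast
      have hsuf : (suffs cs).getD (e + 1) none
          = some (cs.getD (minScan cs (e + 1)) ' ') := by
        rw [suffs_getD]
        exact minv_drop cs (e + 1) (minScan cs (e + 1)) hf1 hf2 hf3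
      have hp : (fun t => match (suffs cs).getD (e + 1) none with
          | none => true
          | some m => decide (t ≤ m))
          = (fun c => decide (c ≤ cs.getD (minScan cs (e + 1)) ' ')) := by
        funext t; rw [hsuf]
      have hpc : decide (cs[e] ≤ cs.getD (minScan cs (e + 1)) ' ') = true := by
        have h1 : cs.getD e ' ' ≤ cs.getD (minScan cs (e + 1)) ' ' :=
          he3 (minScan cs (e + 1)) (by omega) hf2
        rw [List.getD_eq_getElem cs ' ' he2] at h1
        simpa using h1
      simp only [hp]
      rw [popWhile_cons_pos _ _ _ hpc]
      simp only []
      rw [ih (e + 1) _ hlast (by omega)]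
      rw [List.cons_append]
    · -- last segment: e is the final index, everything gets popped
      simp only [if_neg hlast]
      have hen : e + 1 = cs.length := by omega
      have hsuf : (suffs cs).getD (e + 1) none = none := by
        rw [suffs_getD]
        have hd : cs.drop (e + 1) = [] := by simp [List.drop_eq_nil_iff]; omega
        rw [hd]; rfl
      have hp : (fun t => match (suffs cs).getD (e + 1) none with
          | none => true
          | some m => decide (t ≤ m)) = (fun _ => true) := by
        funext t; rw [hsuf]
      simp only [hp]
      rw [popWhile_true]
      simp only []
      have hdropE1 : cs.drop (e + 1) = [] := by simp [List.drop_eq_nil_iff]; omega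
      rw [hdropE1]
      have haloop : ∀ (st : List Char), aloop cs fuel (e + 1) e st = st := by
        intro st
        cases fuel with
        | zero => rfl
        | succ f => rw [aloop]; simp [hen]
      rw [bloop, haloop]
      rw [List.append_nil, popWhile_append]

-- ===== VERDICT (by name: the statement is the Claim_ definition above) =====
theorem q2434_spec : Claim_equal_q2434 := by
  unfold Claim_equal_q2434 Spec_q2434
  intro msg _
  unfold q2434 q2434_alt
  by_cases h : msg.toList.length ≤ 1
  · simp only [if_pos h]
    cases hcs : msg.toList with
    | nil =>
      have hmsg : msg = String.ofList msg.toList := String.ofList_toList.symm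
      rw [hmsg, hcs]
      rfl
    | cons c rest =>
      have hrest : rest = [] := by
        rw [hcs] at h; simpa using h
      subst hrest
      have hmsg : msg = String.ofList msg.toList := String.ofList_toList.symm
      rw [hmsg, hcs]
      have hsuf : (suffs [c]).getD 1 none = none := by
        rw [suffs_getD]; rfl
      rw [bloop]
      have hp : (fun t => match (suffs [c]).getD (0 + 1) none with
          | none => true
          | some m => decide (t ≤ m)) = (fun _ => true) := by
        funext t
        simp only [Nat.zero_add, hsuf]
      simp only [hp]
      rw [popWhile_true]
      rfl
  · simp only [if_neg h]
    have h0 : 0 < msg.toList.length := by omega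
    congr 1
    have hml := main_lemma msg.toList msg.toList.length 0 [] h0 (by omega)
    rw [List.drop_zero] at hml
    exact hml.symm
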